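-- pv_equiv track=rewrite | github.com/math65/accessible-media-converter | core/track_settings.py | _ensure_default_exclusive
-- ===== SOURCE A (Python) =====
-- import copy
--
-- def _ensure_default_exclusive(entries):
--     normalized_entries = copy.deepcopy(entries)
--     default_found = False
--     for entry in normalized_entries:
--         dispositions = entry.get("dispositions", {})
--         if not dispositions.get("default", False):
--             continue
--         if not default_found:
--             default_found = True
--             continue
--         dispositions["default"] = False
--     return normalized_entries
-- ===== SOURCE B (Python) =====
-- import copy
--
-- def _ensure_default_exclusive(entries):
--     def is_default(e):
--         return bool(e.get("dispositions", {}).get("default", False))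
--
--     def cleared(e):
--         if not is_default(e):
--             return e
--         return {**e, "dispositions": {**e["dispositions"], "default": False}}
--
--     # split point: length of the prefix with no default entry
--     i = 0
--     while i < len(entries) and not is_default(entries[i]):
--         i += 1
--     # prefix up to and including the first default entry stays verbatim;
--     # the suffix is rebuilt functionally with every default flag cleared
--     return copy.deepcopy(entries[: i + 1]) + [cleared(e) for e in copy.deepcopy(entries[i + 1:])]
-- ===== Notes on version B (the rewrite author's own statement) =====
-- stated objective: alternative
-- what changed: Replaces A's single in-place pass carrying a mutable default_found flag by a purely functional slice-at-split-point structure: compute the length of the default-free prefix, keep the list verbatim through the first default entry, and rebuild the suffix with a map that returns new dicts with the default flag cleared (no mutation, no flag, no index bookkeeping).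
import Mathlib
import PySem

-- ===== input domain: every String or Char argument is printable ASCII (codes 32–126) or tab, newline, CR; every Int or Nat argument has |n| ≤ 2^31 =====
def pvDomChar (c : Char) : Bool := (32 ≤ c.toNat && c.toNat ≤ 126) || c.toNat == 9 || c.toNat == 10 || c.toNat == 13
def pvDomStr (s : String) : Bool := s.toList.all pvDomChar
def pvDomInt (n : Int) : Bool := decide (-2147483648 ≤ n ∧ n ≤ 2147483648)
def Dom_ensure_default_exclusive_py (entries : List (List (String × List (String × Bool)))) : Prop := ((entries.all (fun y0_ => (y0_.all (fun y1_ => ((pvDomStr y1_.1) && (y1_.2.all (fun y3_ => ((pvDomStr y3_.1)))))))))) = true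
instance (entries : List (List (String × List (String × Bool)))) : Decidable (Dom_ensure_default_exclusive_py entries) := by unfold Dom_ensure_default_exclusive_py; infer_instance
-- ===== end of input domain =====

-- B trades A's in-place pass with a mutable default_found flag for a purely
-- functional split: unchanged prefix through the first default entry, plus a
-- map over the suffix rebuilding default entries with the flag cleared.
-- Both return a fresh structure (deepcopy), so return-value equality is the
-- whole story.

-- shared dict primitives (assoc list, first-match lookup; overwrite keeps the
-- key's position, appends if absent — Python dict / {**d, k: v} semantics)
def pvGetD {α : Type} (d : List (String × α)) (k : String) (dflt : α) : α :=
  match d with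
  | [] => dflt
  | (k', v) :: r => if k' = k then v else pvGetD r k dflt

def pvSetFirst {α : Type} (d : List (String × α)) (k : String) (v : α) : List (String × α) :=
  match d with
  | [] => [(k, v)]
  | (k', v') :: r => if k' = k then (k', v) :: r else (k', v') :: pvSetFirst r k v

-- ===== PORT A =====
-- the for-loop over normalized_entries, carrying default_found
def pvGoA (found : Bool) :
    List (List (String × List (String × Bool))) → List (List (String × List (String × Bool)))
  | [] => []
  | entry :: rest =>
    let dispositions := pvGetD entry "dispositions" []
    if !(pvGetD dispositions "default" false) then
      entry :: pvGoA found rest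
    else if !found then
      entry :: pvGoA true rest
    else
      pvSetFirst entry "dispositions" (pvSetFirst dispositions "default" false) :: pvGoA found rest

def ensure_default_exclusive_py (entries : List (List (String × List (String × Bool)))) : List (List (String × List (String × Bool))) :=
  pvGoA false entries

-- ===== PORT B =====
def pvIsDefault (entry : List (String × List (String × Bool))) : Bool :=
  pvGetD (pvGetD entry "dispositions" []) "default" false

-- {**e, "dispositions": {**e["dispositions"], "default": False}} when default
def pvCleared (entry : List (String × List (String × Bool))) : List (String × List (String × Bool)) :=
  if !pvIsDefault entry then entry
  else pvSetFirst entry "dispositions" (pvSetFirst (pvGetD entry "dispositions" []) "default" false)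

-- the while loop computing the length of the default-free prefix
def pvSplitLen : List (List (String × List (String × Bool))) → Nat
  | [] => 0
  | entry :: rest => if pvIsDefault entry then 0 else pvSplitLen rest + 1

def ensure_default_exclusive_py_alt (entries : List (List (String × List (String × Bool)))) : List (List (String × List (String × Bool))) :=
  let i := pvSplitLen entries
  entries.take (i + 1) ++ (entries.drop (i + 1)).map pvCleared

-- ===== PRECONDITION & SPEC =====
def Spec_ensure_default_exclusive_py (entries : List (List (String × List (String × Bool)))) (out : List (List (String × List (String × Bool)))) : Prop := out = ensure_default_exclusive_py_alt entries
instance (entries : List (List (String × List (String × Bool)))) (out : List (List (String × List (String × Bool)))) : Decidable (Spec_ensure_default_exclusive_py entries out) := by unfold Spec_ensure_default_exclusive_py; infer_instance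

-- ===== CLAIM (what is proved, stated in full; the proofs are below) =====
def Claim_equal_ensure_default_exclusive_py : Prop := ∀ (entries : List (List (String × List (String × Bool)))), Dom_ensure_default_exclusive_py entries → Spec_ensure_default_exclusive_py entries (ensure_default_exclusive_py entries)

-- ===== LEMMAS AND PROOFS =====

-- after default_found is set, A's loop clears every default entry it meets,
-- which is exactly B's pvCleared map
theorem pvGoA_true (l : List (List (String × List (String × Bool)))) :
    pvGoA true l = l.map pvCleared := by
  induction l with
  | nil => rfl
  | cons e r ih =>
    simp only [pvGoA, List.map, ih, pvCleared, pvIsDefault]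
    by_cases h : pvGetD (pvGetD e "dispositions" []) "default" false = true
    · simp [h]
    · simp [Bool.eq_false_iff.mpr h]

-- the bridge: A's flag pass equals B's take/append/map layout
theorem pvGoA_false_eq (l : List (List (String × List (String × Bool)))) :
    pvGoA false l = l.take (pvSplitLen l + 1) ++ (l.drop (pvSplitLen l + 1)).map pvCleared := by
  induction l with
  | nil => rfl
  | cons e r ih =>
    by_cases h : pvIsDefault e = true
    · have hd : pvGetD (pvGetD e "dispositions" []) "default" false = true := h
      simp only [pvGoA, pvSplitLen, h, hd, if_true, Bool.not_true, Bool.false_eq_true, if_false,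
        Bool.not_false, List.take_succ_cons, List.take_zero, List.drop_succ_cons, List.drop_zero,
        List.cons_append, List.nil_append]
      rw [pvGoA_true]
    · have hd : pvGetD (pvGetD e "dispositions" []) "default" false = false :=
        Bool.eq_false_iff.mpr (by simpa [pvIsDefault] using h)
      simp only [pvGoA, pvSplitLen, h, hd, Bool.not_false, if_true, Bool.false_eq_true, if_false,
        List.take_succ_cons, List.drop_succ_cons, List.cons_append]
      rw [ih]

-- ===== VERDICT (by name: the statement is the Claim_ definition above) =====
theorem ensure_default_exclusive_py_spec : Claim_equal_ensure_default_exclusive_py := by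
  intro entries _
  unfold Spec_ensure_default_exclusive_py ensure_default_exclusive_py ensure_default_exclusive_py_alt
  exact pvGoA_false_eq entries
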